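-- pv_equiv track=rewrite | github.com/DarkSawOktay/Secure-LAN-Game-Architecture | lobby_logic.py | count_teams
-- ===== SOURCE A (Python) =====
-- def count_teams(connected_players):
--     """Compte les joueurs par équipe et retourne les statistiques"""
--     team_counts = {0: 0, 1: 0, 2: 0}
--     players_by_team = {0: [], 1: [], 2: []}
--
--     for pseudo, data in connected_players.items():
--         p = data["player"]
--         if "team" in p:
--             team = p["team"]
--             if team in team_counts:
--                 team_counts[team] += 1
--                 players_by_team[team].append(pseudo)
--
--     return team_counts, players_by_team
-- ===== SOURCE B (Python) =====
-- def count_teams(connected_players):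
--     """Compte les joueurs par équipe et retourne les statistiques"""
--     pairs = [(d["player"]["team"], pseudo)
--              for pseudo, d in connected_players.items()
--              if "team" in d["player"]]
--     players_by_team = {t: [ps for tm, ps in pairs if tm == t] for t in (0, 1, 2)}
--     team_counts = {t: len(players_by_team[t]) for t in (0, 1, 2)}
--     return team_counts, players_by_team
-- ===== Notes on version B (the rewrite author's own statement) =====
-- stated objective: simpler
-- what changed: Replaces the single loop that mutates two parallel dicts (a counter and a grouping) with a comprehension pipeline: one filtered pass collecting (team, pseudo) pairs, then grouping by comprehension per team and deriving the counts as list lengths, removing the mutable counter entirely.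
import Mathlib
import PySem

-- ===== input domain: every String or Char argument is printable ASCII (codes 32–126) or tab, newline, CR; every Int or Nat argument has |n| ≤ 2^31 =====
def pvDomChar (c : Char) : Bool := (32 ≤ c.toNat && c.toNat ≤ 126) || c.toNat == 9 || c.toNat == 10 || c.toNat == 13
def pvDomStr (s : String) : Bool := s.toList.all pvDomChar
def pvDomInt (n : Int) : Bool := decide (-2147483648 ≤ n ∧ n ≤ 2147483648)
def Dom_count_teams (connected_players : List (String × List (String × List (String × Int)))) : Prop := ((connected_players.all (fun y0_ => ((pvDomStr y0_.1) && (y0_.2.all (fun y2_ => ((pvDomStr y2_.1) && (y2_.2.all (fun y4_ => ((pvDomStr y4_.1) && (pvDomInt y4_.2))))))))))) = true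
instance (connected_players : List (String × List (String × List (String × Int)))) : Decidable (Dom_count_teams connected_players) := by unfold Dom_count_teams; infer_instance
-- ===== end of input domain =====

-- B replaces A's single loop mutating two parallel dicts by a filtered pair-collection pass,
-- per-team grouping comprehensions and counts derived as list lengths (objective: simpler).

-- ===== PORT A =====
-- literal port of A: one loop over the players, incrementing team_counts and appending to
-- players_by_team, both dicts seeded with keys 0,1,2.
def count_teams (connected_players : List (String × List (String × List (String × Int)))) : (List (Int × Int)) × (List (Int × List String)) :=
  let init : PySem.Dict Int Int × PySem.Dict Int (List String) :=
    (PySem.Dict.mk [((0 : Int), (0 : Int)), (1, 0), (2, 0)],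
     PySem.Dict.mk [((0 : Int), ([] : List String)), (1, []), (2, [])])
  let st := connected_players.foldl (fun st x =>
    -- p = data["player"] (Pre_ guarantees the key exists; Python raises KeyError otherwise)
    let p := PySem.Dict.mk (((PySem.Dict.mk x.2).get? "player").getD [])
    if p.contains "team" then
      let team := (p.get? "team").getD 0
      if st.1.contains team then
        (st.1.modify team 0 (· + 1), st.2.modify team [] (· ++ [x.1]))
      else st
    else st) init
  (st.1.items, st.2.items)

-- ===== PORT B =====
-- literal port of Source B: comprehension collecting (team, pseudo) pairs, then grouping and
-- counting comprehensions over the fixed team tuple (0, 1, 2).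
def count_teams_alt (connected_players : List (String × List (String × List (String × Int)))) : (List (Int × Int)) × (List (Int × List String)) :=
  let pairs :=
    (connected_players.filter (fun x =>
        (PySem.Dict.mk (((PySem.Dict.mk x.2).get? "player").getD [])).contains "team")).map
      (fun x =>
        ((((PySem.Dict.mk (((PySem.Dict.mk x.2).get? "player").getD [])).get? "team").getD 0, x.1)))
  let players_by_team := PySem.Dict.mk
    (([0, 1, 2] : List Int).map (fun t => (t, (pairs.filter (fun q => q.1 == t)).map (·.2))))
  let team_counts :=
    ([0, 1, 2] : List Int).map (fun t => (t, ((players_by_team.getD t []).length : Int)))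
  (team_counts, players_by_team.items)

-- ===== PRECONDITION & SPEC =====
-- Pre_ excludes exactly the inputs on which some player's data dict has no "player" key:
-- there the Python A raises KeyError and returns nothing.
def Pre_count_teams (connected_players : List (String × List (String × List (String × Int)))) : Prop :=
  ∀ x ∈ connected_players, "player" ∈ x.2.map (·.1)
instance (connected_players : List (String × List (String × List (String × Int)))) : Decidable (Pre_count_teams connected_players) := by unfold Pre_count_teams; infer_instance
def pvWitness_count_teams : (List (String × List (String × List (String × Int)))) :=
  [("alice", [("player", [("team", 1)])]), ("bob", [("player", [("hp", 3)])])]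
def Spec_count_teams (connected_players : List (String × List (String × List (String × Int)))) (out : (List (Int × Int)) × (List (Int × List String))) : Prop := out = count_teams_alt connected_players
instance (connected_players : List (String × List (String × List (String × Int)))) (out : (List (Int × Int)) × (List (Int × List String))) : Decidable (Spec_count_teams connected_players out) := by unfold Spec_count_teams; infer_instance

-- ===== CLAIM (what is proved, stated in full; the proofs are below) =====
def Claim_equal_count_teams : Prop := ∀ (connected_players : List (String × List (String × List (String × Int)))), Dom_count_teams connected_players → Pre_count_teams connected_players → Spec_count_teams connected_players (count_teams connected_players)

-- ===== LEMMAS AND PROOFS =====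

-- the team lookup of an entry, and the per-entry guard, exactly as both ports compute them
def pvP (x : String × List (String × List (String × Int))) : PySem.Dict String Int :=
  PySem.Dict.mk (((PySem.Dict.mk x.2).get? "player").getD [])
def pvHasTeam (x : String × List (String × List (String × Int))) : Bool := (pvP x).contains "team"
def pvTeam (x : String × List (String × List (String × Int))) : Int := ((pvP x).get? "team").getD 0
-- the pseudos with team t among the entries, in order (what B's grouping comprehension builds)
def pvSel (t : Int) (cp : List (String × List (String × List (String × Int)))) : List String :=
  ((((cp.filter (fun x => pvHasTeam x)).map (fun x => (pvTeam x, x.1))).filter (fun q => q.1 == t)).map (·.2))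

theorem pvSel_append (t : Int) (cp : List (String × List (String × List (String × Int)))) (x : String × List (String × List (String × Int))) :
    pvSel t (cp ++ [x]) = pvSel t cp ++ (if pvHasTeam x ∧ pvTeam x = t then [x.1] else []) := by
  simp only [pvSel, List.filter_append, List.map_append, List.filter_cons, List.filter_nil]
  by_cases h : pvHasTeam x
  · simp only [h, if_true, List.map_cons, List.map_nil, List.filter_cons,
      List.filter_nil]
    by_cases ht : pvTeam x = t
    · simp [ht]
    · simp [ht, beq_iff_eq]
  · simp [h]

-- loop invariant: after A's loop the two dicts hold exactly the per-team selections and their lengths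
theorem pvLoop (cp : List (String × List (String × List (String × Int)))) :
    cp.foldl (fun st x =>
      let p := PySem.Dict.mk (((PySem.Dict.mk x.2).get? "player").getD [])
      if p.contains "team" then
        let team := (p.get? "team").getD 0
        if st.1.contains team then
          (st.1.modify team 0 (· + 1), st.2.modify team [] (· ++ [x.1]))
        else st
      else st)
      ((PySem.Dict.mk [((0 : Int), (0 : Int)), (1, 0), (2, 0)],
        PySem.Dict.mk [((0 : Int), ([] : List String)), (1, []), (2, [])]) :
        PySem.Dict Int Int × PySem.Dict Int (List String))
    = (PySem.Dict.mk [((0 : Int), ((pvSel 0 cp).length : Int)), (1, (pvSel 1 cp).length), (2, (pvSel 2 cp).length)],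
       PySem.Dict.mk [((0 : Int), pvSel 0 cp), (1, pvSel 1 cp), (2, pvSel 2 cp)]) := by
  induction cp using List.reverseRecOn with
  | nil => rfl
  | append_singleton cp x ih =>
    rw [List.foldl_append, ih]
    simp only [List.foldl_cons, List.foldl_nil]
    show (if pvHasTeam x then _ else _) = _
    by_cases h : pvHasTeam x
    · rw [if_pos h]
      have hkey : (((PySem.Dict.mk (((PySem.Dict.mk x.2).get? "player").getD ([] : List (String × Int)))).get? "team").getD 0) = pvTeam x := rfl
      rw [hkey]
      by_cases h0 : pvTeam x = 0
      · rw [h0]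
        simp [PySem.Dict.contains_mk, PySem.Dict.modify, PySem.Dict.ext_iff,
          PySem.Dict.items_insert_of_contains, PySem.Dict.getD_eq_get?_getD,
          PySem.Dict.get?_mk_cons, pvSel_append, h, h0]
      · by_cases h1 : pvTeam x = 1
        · rw [h1]
          simp [PySem.Dict.contains_mk, PySem.Dict.modify, PySem.Dict.ext_iff,
            PySem.Dict.items_insert_of_contains, PySem.Dict.getD_eq_get?_getD,
            PySem.Dict.get?_mk_cons, pvSel_append, h, h1]
        · by_cases h2 : pvTeam x = 2
          · rw [h2]
            simp [PySem.Dict.contains_mk, PySem.Dict.modify, PySem.Dict.ext_iff,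
              PySem.Dict.items_insert_of_contains, PySem.Dict.getD_eq_get?_getD,
              PySem.Dict.get?_mk_cons, pvSel_append, h, h2]
          · simp [PySem.Dict.contains_mk, Ne.symm h0, Ne.symm h1, Ne.symm h2,
              pvSel_append, h, h0, h1, h2]
    · simp [h, pvSel_append]

-- ===== VERDICT (by name: the statement is the Claim_ definition above) =====
theorem count_teams_spec : Claim_equal_count_teams := by
  intro cp _ _
  show count_teams cp = count_teams_alt cp
  simp only [count_teams, count_teams_alt]
  rw [pvLoop cp]
  simp [pvSel, pvHasTeam, pvTeam, pvP, PySem.Dict.getD_eq_get?_getD,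
    PySem.Dict.get?_mk_cons]
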